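-- pv_equiv track=rewrite | github.com/k-harada/AtCoder | ABC/ABC201-250/ABC206/C.py | solve
-- ===== SOURCE A (Python) =====
-- def solve(n, a_list):
--     res = n * (n + 1) // 2
--     v_dict = dict()
--     for a in a_list:
--         if a not in v_dict.keys():
--             v_dict[a] = 1
--         else:
--             v_dict[a] += 1
--     for v in v_dict.values():
--         res -= v * (v + 1) // 2
--     return res
-- ===== SOURCE B (Python) =====
-- def solve(n, a_list):
--     res = n * (n + 1) // 2
--     seen = {}
--     for a in a_list:
--         c = seen.get(a, 0) + 1
--         seen[a] = c
--         res -= c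
--     return res
-- ===== Notes on version B (the rewrite author's own statement) =====
-- stated objective: simpler
-- what changed: B replaces A's build-a-frequency-dict-then-second-combinatorial-pass (subtracting v*(v+1)//2 per distinct value) with a single pass that subtracts the running occurrence count of each element as it arrives; the second loop and the per-value triangular formula disappear.
import Mathlib
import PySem

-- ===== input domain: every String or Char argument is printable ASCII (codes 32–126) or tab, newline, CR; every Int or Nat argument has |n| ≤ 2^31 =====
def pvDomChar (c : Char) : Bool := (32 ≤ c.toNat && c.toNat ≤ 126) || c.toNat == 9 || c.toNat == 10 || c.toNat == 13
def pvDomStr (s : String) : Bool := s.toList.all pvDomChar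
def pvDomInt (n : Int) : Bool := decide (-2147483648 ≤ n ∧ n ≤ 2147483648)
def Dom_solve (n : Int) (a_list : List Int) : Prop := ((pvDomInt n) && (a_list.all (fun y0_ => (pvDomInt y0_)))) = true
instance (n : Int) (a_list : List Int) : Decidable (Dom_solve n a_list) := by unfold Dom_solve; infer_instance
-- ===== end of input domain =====

-- B replaces A's two-pass (frequency dict, then subtract v*(v+1)//2 per distinct value) with a
-- single pass subtracting the running occurrence count of each element; same value, simpler code.


-- ===== PORT A =====
-- first loop: frequency dict ('if a not in v_dict: v_dict[a] = 1 else: v_dict[a] += 1')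
def solveStepA (d : PySem.Dict Int Int) (a : Int) : PySem.Dict Int Int :=
  if d.contains a then d.insert a (d.getD a 0 + 1) else d.insert a 1

def solve (n : Int) (a_list : List Int) : Int :=
  let res := PySem.Int.floordiv (n * (n + 1)) 2
  let v_dict := a_list.foldl solveStepA PySem.Dict.empty
  v_dict.values.foldl (fun r v => r - PySem.Int.floordiv (v * (v + 1)) 2) res

-- ===== PORT B =====
-- one pass: subtract the running count of each element as it arrives
def solveStepB (st : PySem.Dict Int Int × Int) (a : Int) : PySem.Dict Int Int × Int :=
  let c := st.1.getD a 0 + 1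
  (st.1.insert a c, st.2 - c)

def solve_alt (n : Int) (a_list : List Int) : Int :=
  (a_list.foldl solveStepB (PySem.Dict.empty, PySem.Int.floordiv (n * (n + 1)) 2)).2

-- ===== PRECONDITION & SPEC =====
def Spec_solve (n : Int) (a_list : List Int) (out : Int) : Prop := out = solve_alt n a_list
instance (n : Int) (a_list : List Int) (out : Int) : Decidable (Spec_solve n a_list out) := by unfold Spec_solve; infer_instance

-- ===== CLAIM (what is proved, stated in full; the proofs are below) =====
def Claim_equal_solve : Prop := ∀ (n : Int) (a_list : List Int), Dom_solve n a_list → Spec_solve n a_list (solve n a_list)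

-- ===== LEMMAS AND PROOFS =====

-- tri v = v*(v+1)//2; exact because v*(v+1) is even
def tri (v : Int) : Int := PySem.Int.floordiv (v * (v + 1)) 2

theorem tri_succ (v : Int) : tri (v + 1) = tri v + (v + 1) := by
  obtain ⟨t, ht⟩ := Int.even_mul_succ_self v
  have h1 : v * (v + 1) = 2 * t := by omega
  have h2 : (v + 1) * (v + 1 + 1) = 2 * (t + v + 1) := by nlinarith [h1]
  unfold tri
  rw [PySem.Int.floordiv_eq_ediv_of_pos (by norm_num), PySem.Int.floordiv_eq_ediv_of_pos (by norm_num),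
    h1, h2, Int.mul_ediv_cancel_left _ (by norm_num), Int.mul_ediv_cancel_left _ (by norm_num)]
  ring

theorem tri_one : tri 1 = 1 := by decide

-- A's step is the insert-with-getD step (in the absent branch getD is 0)
theorem stepA_eq (d : PySem.Dict Int Int) (a : Int) :
    solveStepA d a = d.insert a (d.getD a 0 + 1) := by
  unfold solveStepA
  by_cases h : d.contains a
  · simp [h]
  · have hc : d.contains a = false := by simpa using h
    rw [if_neg (by simp [hc]), PySem.Dict.getD_of_not_contains d 0 hc]
    norm_num

theorem dictA_eq_counter (l : List Int) :
    l.foldl solveStepA PySem.Dict.empty = PySem.Dict.counter l := by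
  rw [PySem.List.foldl_congr_mem l solveStepA (fun d x => d.insert x (d.getD x 0 + 1))
    PySem.Dict.empty (fun d x _ => stepA_eq d x)]
  exact PySem.Dict.foldl_insert_getD_add_one_eq_counter l

-- a subtracting foldl is r minus the sum
theorem foldl_sub_tri (l : List Int) (r : Int) :
    l.foldl (fun r v => r - PySem.Int.floordiv (v * (v + 1)) 2) r
      = r - (l.map tri).sum := by
  induction l generalizing r with
  | nil => simp
  | cons x xs ih =>
    simp only [List.foldl_cons, List.map_cons, List.sum_cons]
    rw [ih]
    unfold tri
    ring

-- the A-side total: sum of tri over distinct values' counts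
def asum (l : List Int) : Int := ((PySem.Set.ofList l).map (fun k => tri (l.count k : Int))).sum

theorem solve_eq_asum (n : Int) (l : List Int) :
    solve n l = PySem.Int.floordiv (n * (n + 1)) 2 - asum l := by
  unfold solve
  rw [dictA_eq_counter, foldl_sub_tri]
  have hnd := PySem.Dict.nodup_keys_counter (κ := Int) l
  rw [PySem.Dict.values_eq_map_keys _ hnd 0]
  unfold asum
  rw [PySem.Dict.keys_counter]
  rw [List.map_map]
  have hmap : List.map (tri ∘ fun k => (PySem.Dict.counter l).getD k 0) (PySem.Set.ofList l)
      = List.map (fun k => tri (l.count k : Int)) (PySem.Set.ofList l) := by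
    apply List.map_congr_left
    intro k _
    simp [Function.comp, PySem.Dict.getD_counter]
  rw [hmap]

-- B's dict component is the plain counting fold
theorem bloop_fst (l : List Int) (d : PySem.Dict Int Int) (r : Int) :
    (l.foldl solveStepB (d, r)).1 = l.foldl (fun d x => d.insert x (d.getD x 0 + 1)) d := by
  induction l generalizing d r with
  | nil => rfl
  | cons x xs ih => simp only [List.foldl_cons, solveStepB]; exact ih _ _

-- sum over a Nodup list where the function changes only at a member a
theorem sum_update_mem {s : List Int} (hnd : s.Nodup) {a : Int} (ha : a ∈ s)
    (f g : Int → Int) (hfg : ∀ k, k ≠ a → f k = g k) :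
    (s.map f).sum = (s.map g).sum + (f a - g a) := by
  have hperm : s.Perm (a :: s.erase a) := List.perm_cons_erase ha
  have hf := (hperm.map f).sum_eq
  have hg := (hperm.map g).sum_eq
  have herase : ((s.erase a).map f).sum = ((s.erase a).map g).sum := by
    apply congrArg
    apply List.map_congr_left
    intro k hk
    exact hfg k ((hnd.mem_erase_iff.mp hk).1)
  simp only [List.map_cons, List.sum_cons] at hf hg
  omega

theorem count_append_singleton_ne {l : List Int} {k a : Int} (hk : k ≠ a) :
    (l ++ [a]).count k = l.count k := by
  have hne : ¬ (a = k) := fun h => hk h.symm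
  simp [List.count_append, hne]

theorem asum_append (l : List Int) (a : Int) :
    asum (l ++ [a]) = asum l + ((l.count a : Int) + 1) := by
  unfold asum
  rw [PySem.Set.ofList_append_singleton]
  by_cases hmem : a ∈ l
  · have hmem' : a ∈ PySem.Set.ofList l := (PySem.Set.mem_ofList l a).mpr hmem
    rw [PySem.Set.add_of_mem hmem']
    have hdiff := sum_update_mem (PySem.Set.nodup_ofList l) hmem'
      (fun k => tri ((l ++ [a]).count k : Int)) (fun k => tri (l.count k : Int))
      (fun k hk => by simp only [count_append_singleton_ne hk])
    simp only at hdiff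
    have hca : (l ++ [a]).count a = l.count a + 1 := by simp [List.count_append]
    rw [hdiff, hca]
    push_cast
    rw [tri_succ]
    ring
  · have hmem' : a ∉ PySem.Set.ofList l := fun h => hmem ((PySem.Set.mem_ofList l a).mp h)
    rw [PySem.Set.add_of_not_mem hmem']
    rw [List.map_append, List.sum_append]
    have hcnt0 : l.count a = 0 := List.count_eq_zero.mpr hmem
    have hca : (l ++ [a]).count a = 1 := by simp [List.count_append, hcnt0]
    have hrest : ((PySem.Set.ofList l).map (fun k => tri ((l ++ [a]).count k : Int))).sum
        = ((PySem.Set.ofList l).map (fun k => tri (l.count k : Int))).sum := by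
      apply congrArg
      apply List.map_congr_left
      intro k hk
      have hkne : k ≠ a := fun h => hmem' (h ▸ hk)
      simp only [count_append_singleton_ne hkne]
    rw [hrest]
    simp [tri_one, hcnt0]

theorem bloop_snd (l : List Int) (r : Int) :
    (l.foldl solveStepB (PySem.Dict.empty, r)).2 = r - asum l := by
  induction l using List.reverseRecOn with
  | nil => simp [asum, PySem.Set.ofList]
  | append_singleton xs a ih =>
    rw [List.foldl_append, List.foldl_cons, List.foldl_nil]
    have hgetD : ((xs.foldl solveStepB (PySem.Dict.empty, r)).1).getD a 0 = (xs.count a : Int) := by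
      rw [bloop_fst xs PySem.Dict.empty r]
      simpa using PySem.Dict.getD_foldl_insert_add_one xs PySem.Dict.empty a
    show (xs.foldl solveStepB (PySem.Dict.empty, r)).2
        - (((xs.foldl solveStepB (PySem.Dict.empty, r)).1).getD a 0 + 1)
        = r - asum (xs ++ [a])
    rw [hgetD, ih, asum_append]
    ring

-- ===== VERDICT (by name: the statement is the Claim_ definition above) =====
theorem solve_spec : Claim_equal_solve := by
  intro n a_list _
  unfold Spec_solve solve_alt
  rw [bloop_snd, solve_eq_asum]
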